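-- pv_equiv track=rewrite | github.com/K-Wu/HET | hetero_edgesoftmax/pyhetctor/ir/InterOpSSA/program_serializer.py | find_first_level_scopes
-- ===== SOURCE A (Python) =====
-- from typing import Tuple, Union
--
-- def find_scope_end(lines: list[str], scope_beg: int) -> int:
--     """Find the end of a scope, given the beginning of the scope"""
--     scopes_in_between = 0
--     for idx_line, line in enumerate(lines[scope_beg + 1:]):
--         if line.find("{") != -1:
--             # beginning of another scope
--             scopes_in_between += 1
--         elif line.find("}") != -1:
--             # end of a scope
--             scopes_in_between -= 1
--             if scopes_in_between == -1:
--                 # found the end of the scope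
--                 return idx_line + scope_beg + 1
--     raise ValueError("Scope not closed")
--
-- def find_first_level_scopes(lines: list[str]) -> list[Tuple[int, int, str]]:
--     """Find the first level scopes, and return a dict mapping the scope name to
--     the scope beginning and end"""
--     scope_beg_end_tags = list()
--     idx_line = 0
--     while idx_line < len(lines):
--         line = lines[idx_line]
--         if line.find("{") != -1:
--             # beginning of a scope
--             scope_name = line[: line.find("{")]
--             scope_beg = idx_line
--             scope_end = find_scope_end(lines, scope_beg)
--             scope_beg_end_tags.append((scope_beg, scope_end, scope_name))
--             idx_line = scope_end + 1
--         else: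
--             idx_line += 1
--     return scope_beg_end_tags
-- ===== SOURCE B (Python) =====
-- def find_first_level_scopes(lines):
--     """Single flat pass with a brace-depth counter instead of an outer loop
--     that re-scans forward with a helper."""
--     scope_beg_end_tags = []
--     depth = 0
--     beg = 0
--     name = ""
--     for idx, line in enumerate(lines):
--         p = line.find("{")
--         if p != -1:
--             if depth == 0:
--                 beg = idx
--                 name = line[:p]
--             depth += 1
--         elif line.find("}") != -1 and depth > 0:
--             depth -= 1
--             if depth == 0:
--                 scope_beg_end_tags.append((beg, idx, name))
--     if depth != 0:
--         raise ValueError("Scope not closed")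
--     return scope_beg_end_tags
-- ===== Notes on version B (the rewrite author's own statement) =====
-- stated objective: simpler
-- what changed: Replaced the outer while-loop that re-scans forward with a find_scope_end helper and index jumps by a single flat pass over lines threading one integer depth counter, capturing (beg, name) when depth rises from 0 and emitting (beg, idx, name) when it returns to 0.
import Mathlib
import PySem

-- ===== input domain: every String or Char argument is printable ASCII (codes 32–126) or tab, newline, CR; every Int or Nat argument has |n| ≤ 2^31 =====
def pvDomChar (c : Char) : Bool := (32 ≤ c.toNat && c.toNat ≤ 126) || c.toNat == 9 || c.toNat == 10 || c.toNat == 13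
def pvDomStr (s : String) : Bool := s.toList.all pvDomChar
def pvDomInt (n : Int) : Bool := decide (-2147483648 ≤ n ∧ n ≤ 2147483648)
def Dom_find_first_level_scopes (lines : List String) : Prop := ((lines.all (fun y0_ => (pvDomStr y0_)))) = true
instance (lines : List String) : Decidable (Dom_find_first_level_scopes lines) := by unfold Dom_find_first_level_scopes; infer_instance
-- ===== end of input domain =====

-- B replaces A's outer loop + forward-rescanning helper by one flat pass with a depth counter (simpler decomposition, same O(n) cost).


-- ===== PORT A =====
-- find_scope_end's loop over lines[scope_beg+1:]; idx is the ABSOLUTE line number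
-- (Python's idx_line + scope_beg + 1); none = the ValueError "Scope not closed".
def pvFindScopeEndLoop : List String → Int → Nat → Option Nat
  | [], _, _ => none
  | line :: rest, s, idx =>
      if PySem.Str.find line "{" ≠ -1 then pvFindScopeEndLoop rest (s + 1) (idx + 1)
      else if PySem.Str.find line "}" ≠ -1 then
        if s - 1 = -1 then some idx else pvFindScopeEndLoop rest (s - 1) (idx + 1)
      else pvFindScopeEndLoop rest s (idx + 1)

def pvFindScopeEnd? (lines : List String) (scope_beg : Nat) : Option Nat :=
  pvFindScopeEndLoop (lines.drop (scope_beg + 1)) 0 (scope_beg + 1)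

theorem pvFindScopeEndLoop_le (l : List String) (s : Int) (k e : Nat)
    (h : pvFindScopeEndLoop l s k = some e) : k ≤ e := by
  induction l generalizing s k with
  | nil => simp [pvFindScopeEndLoop] at h
  | cons line rest ih =>
      unfold pvFindScopeEndLoop at h
      split_ifs at h with h1 h2 h3
      · exact Nat.le_of_succ_le (ih _ _ h)
      · simp only [Option.some.injEq] at h; omega
      · exact Nat.le_of_succ_le (ih _ _ h)
      · exact Nat.le_of_succ_le (ih _ _ h)

theorem pvFindScopeEnd?_le (lines : List String) (i e : Nat)
    (h : pvFindScopeEnd? lines i = some e) : i + 1 ≤ e :=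
  pvFindScopeEndLoop_le _ _ _ _ h

-- A's outer while-loop: on a '{' line, jump to the helper's scope end + 1.
def pvOuterLoop (lines : List String) (idx : Nat) (acc : List (Int × Int × String)) :
    List (Int × Int × String) :=
  if h : idx < lines.length then
    if PySem.Str.find lines[idx] "{" ≠ -1 then
      match h' : pvFindScopeEnd? lines idx with
      | some e =>
          pvOuterLoop lines (e + 1)
            (acc ++ [((idx : Int), (e : Int),
                      PySem.Str.slice lines[idx] none (some (PySem.Str.find lines[idx] "{")))])
      | none => acc   -- Python raises ValueError "Scope not closed" here (outside Pre_)
    else pvOuterLoop lines (idx + 1) acc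
  else acc
termination_by lines.length - idx
decreasing_by
  · have := pvFindScopeEnd?_le lines idx e h'; omega
  · omega

def find_first_level_scopes (lines : List String) : List (Int × Int × String) :=
  pvOuterLoop lines 0 []

-- ===== PORT B =====
-- one flat pass: state = (idx, depth, beg, name, res)
def pvAltLoop : List String → Nat → Int → Nat → String → List (Int × Int × String) →
    List (Int × Int × String)
  | [], _, _, _, _, res => res   -- Python raises here if depth ≠ 0 (outside Pre_)
  | line :: rest, idx, depth, beg, name, res =>
      if PySem.Str.find line "{" ≠ -1 then
        if depth = 0 then
          pvAltLoop rest (idx + 1) (depth + 1) idx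
            (PySem.Str.slice line none (some (PySem.Str.find line "{"))) res
        else pvAltLoop rest (idx + 1) (depth + 1) beg name res
      else if PySem.Str.find line "}" ≠ -1 ∧ 0 < depth then
        if depth - 1 = 0 then
          pvAltLoop rest (idx + 1) (depth - 1) beg name (res ++ [((beg : Int), (idx : Int), name)])
        else pvAltLoop rest (idx + 1) (depth - 1) beg name res
      else pvAltLoop rest (idx + 1) depth beg name res

def find_first_level_scopes_alt (lines : List String) : List (Int × Int × String) :=
  pvAltLoop lines 0 0 0 "" []

-- ===== PRECONDITION & SPEC =====
-- brace depth after scanning all lines ('{' line opens; '}' line closes only inside a scope)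
def pvScopeDepth (lines : List String) : Int :=
  lines.foldl
    (fun d line =>
      if PySem.Str.find line "{" ≠ -1 then d + 1
      else if PySem.Str.find line "}" ≠ -1 ∧ 0 < d then d - 1
      else d) 0

-- Pre_ excludes exactly the inputs with an unclosed scope, on which Python A (and B) raises ValueError "Scope not closed".
def Pre_find_first_level_scopes (lines : List String) : Prop := pvScopeDepth lines = 0
instance (lines : List String) : Decidable (Pre_find_first_level_scopes lines) := by
  unfold Pre_find_first_level_scopes; infer_instance

def pvWitness_find_first_level_scopes : List String := ["foo {", "bar {", "}", "} tail", "}"]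

def Spec_find_first_level_scopes (lines : List String) (out : List (Int × Int × String)) : Prop :=
  out = find_first_level_scopes_alt lines
instance (lines : List String) (out : List (Int × Int × String)) :
    Decidable (Spec_find_first_level_scopes lines out) := by
  unfold Spec_find_first_level_scopes; infer_instance

-- ===== CLAIM (what is proved, stated in full; the proofs are below) =====
def Claim_equal_find_first_level_scopes : Prop :=
  ∀ (lines : List String), Dom_find_first_level_scopes lines →
    Pre_find_first_level_scopes lines →
    Spec_find_first_level_scopes lines (find_first_level_scopes lines)

-- ===== LEMMAS AND PROOFS =====

-- inside an open scope (depth d > 0) the flat pass behaves like find_scope_end with s = d - 1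
theorem pvAltLoop_inside (rest : List String) (d : Int) (idx beg : Nat) (name : String)
    (res : List (Int × Int × String)) (hd : 0 < d) :
    pvAltLoop rest idx d beg name res =
      match pvFindScopeEndLoop rest (d - 1) idx with
      | some e => pvAltLoop (rest.drop (e + 1 - idx)) (e + 1) 0 beg name
                    (res ++ [((beg : Int), (e : Int), name)])
      | none => res := by
  induction rest generalizing d idx res with
  | nil => simp [pvAltLoop, pvFindScopeEndLoop]
  | cons line rest ih =>
      by_cases h1 : PySem.Str.find line "{" ≠ -1
      · have hne : ¬ d = 0 := by omega
        rw [pvAltLoop, if_pos h1, if_neg hne, pvFindScopeEndLoop, if_pos h1]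
        have hs : d + 1 - 1 = d := by ring
        have hs2 : d - 1 + 1 = d := by ring
        rw [ih (d + 1) (idx + 1) res (by omega)]
        rw [hs, hs2]
        cases hE : pvFindScopeEndLoop rest d (idx + 1) with
        | none => simp
        | some e =>
            have hle := pvFindScopeEndLoop_le rest d (idx + 1) e hE
            simp only
            have : (line :: rest).drop (e + 1 - idx) = rest.drop (e + 1 - (idx + 1)) := by
              have h2 : e + 1 - idx = (e + 1 - (idx + 1)) + 1 := by omega
              rw [h2, List.drop_succ_cons]
            rw [this]
      · by_cases h2 : PySem.Str.find line "}" ≠ -1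
        · by_cases h3 : d = 1
          · subst h3
            rw [pvAltLoop, if_neg h1, if_pos ⟨h2, by omega⟩, if_pos (by norm_num)]
            rw [pvFindScopeEndLoop, if_neg h1, if_pos h2, if_pos (by norm_num)]
            simp
          · rw [pvAltLoop, if_neg h1, if_pos ⟨h2, hd⟩, if_neg (by omega)]
            rw [pvFindScopeEndLoop, if_neg h1, if_pos h2, if_neg (by omega)]
            have hs : d - 1 - 1 = d - 2 := by ring
            rw [ih (d - 1) (idx + 1) res (by omega)]
            cases hE : pvFindScopeEndLoop rest (d - 1 - 1) (idx + 1) with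
            | none => simp
            | some e =>
                have hle := pvFindScopeEndLoop_le rest (d - 1 - 1) (idx + 1) e hE
                simp only
                have : (line :: rest).drop (e + 1 - idx) = rest.drop (e + 1 - (idx + 1)) := by
                  have h4 : e + 1 - idx = (e + 1 - (idx + 1)) + 1 := by omega
                  rw [h4, List.drop_succ_cons]
                rw [this]
        · rw [pvAltLoop, if_neg h1, if_neg (by tauto), pvFindScopeEndLoop, if_neg h1,
              if_neg h2]
          rw [ih d (idx + 1) res hd]
          cases hE : pvFindScopeEndLoop rest (d - 1) (idx + 1) with
          | none => simp
          | some e =>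
              have hle := pvFindScopeEndLoop_le rest (d - 1) (idx + 1) e hE
              simp only
              have : (line :: rest).drop (e + 1 - idx) = rest.drop (e + 1 - (idx + 1)) := by
                have h4 : e + 1 - idx = (e + 1 - (idx + 1)) + 1 := by omega
                rw [h4, List.drop_succ_cons]
              rw [this]

-- at top level (depth 0) the flat pass from position idx equals A's outer loop
theorem pvOuterLoop_eq_pvAltLoop (lines : List String) (idx : Nat)
    (acc : List (Int × Int × String)) :
    ∀ (beg : Nat) (name : String),
      pvOuterLoop lines idx acc = pvAltLoop (lines.drop idx) idx 0 beg name acc := by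
  induction idx, acc using pvOuterLoop.induct lines with
  | case1 idx acc h h1 e h' ih =>
      intro beg name
      have hdrop : lines.drop idx = lines[idx] :: lines.drop (idx + 1) :=
        List.drop_eq_getElem_cons h
      rw [pvOuterLoop, dif_pos h, if_pos h1, h']
      rw [hdrop, pvAltLoop, if_pos h1, if_pos rfl]
      dsimp only
      simp only [zero_add]
      rw [pvAltLoop_inside (lines.drop (idx + 1)) 1 (idx + 1) idx _ _ (by norm_num)]
      have hE : pvFindScopeEndLoop (lines.drop (idx + 1)) (1 - 1) (idx + 1) = some e := by
        simpa [pvFindScopeEnd?] using h'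
      rw [hE]
      have hle := pvFindScopeEnd?_le lines idx e h'
      simp only
      have hdd : (lines.drop (idx + 1)).drop (e + 1 - (idx + 1)) = lines.drop (e + 1) := by
        rw [List.drop_drop]; congr 1; omega
      rw [hdd]
      exact ih idx _
  | case2 idx acc h h1 h' =>
      intro beg name
      have hdrop : lines.drop idx = lines[idx] :: lines.drop (idx + 1) :=
        List.drop_eq_getElem_cons h
      rw [pvOuterLoop, dif_pos h, if_pos h1, h']
      rw [hdrop, pvAltLoop, if_pos h1, if_pos rfl]
      dsimp only
      simp only [zero_add]
      rw [pvAltLoop_inside (lines.drop (idx + 1)) 1 (idx + 1) idx _ _ (by norm_num)]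
      have hE : pvFindScopeEndLoop (lines.drop (idx + 1)) (1 - 1) (idx + 1) = none := by
        simpa [pvFindScopeEnd?] using h'
      rw [hE]
  | case3 idx acc h h1 ih =>
      intro beg name
      have hdrop : lines.drop idx = lines[idx] :: lines.drop (idx + 1) :=
        List.drop_eq_getElem_cons h
      rw [pvOuterLoop, dif_pos h, if_neg h1]
      simp only [ne_eq, not_not] at h1
      rw [hdrop, pvAltLoop, if_neg (not_not_intro h1)]
      by_cases h2 : PySem.Str.find lines[idx] "}" ≠ -1 ∧ (0 : Int) < 0
      · omega
      · rw [if_neg h2]; exact ih beg name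
  | case4 idx acc h =>
      intro beg name
      rw [pvOuterLoop, dif_neg h]
      have : lines.drop idx = [] := List.drop_eq_nil_of_le (by omega)
      rw [this, pvAltLoop]

-- ===== VERDICT (by name: the statement is the Claim_ definition above) =====
theorem find_first_level_scopes_spec : Claim_equal_find_first_level_scopes := by
  intro lines _ _
  unfold Spec_find_first_level_scopes find_first_level_scopes find_first_level_scopes_alt
  simpa using pvOuterLoop_eq_pvAltLoop lines 0 [] 0 ""
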